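-- pv_equiv track=rewrite | github.com/roottsantiago/pyfiscal | pyfiscal/utils.py | search_consonant
-- ===== SOURCE A (Python) =====
-- def search_consonant(word):
-- 	data = 'X'
-- 	consonant = ''
-- 	length = 0
--
-- 	if word:
-- 		length = len(word)
-- 		length = length-1
-- 		data = word[1:length]
--
-- 	for item in data:
-- 		if item == 'Ñ':
-- 			consonant = 'X'
-- 			break
-- 		elif get_consonant(item):
-- 			consonant = item
-- 			break
-- 	return consonant
--
-- def get_consonant(consonant):
-- 	"Get consonant."
-- 	consonants = (
-- 		'B', 'C', 'D', 'F', 'G', 'H', 'J', 'K', 'L', 'M', 'N',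
-- 		'P', 'Q', 'R', 'S', 'T', 'V', 'W', 'X', 'Y', 'Z'
-- 	)
--
-- 	for item in consonants:
-- 		if item == consonant:
-- 			return True
-- 			break
-- 	return False
-- ===== SOURCE B (Python) =====
-- def search_consonant(word):
--     data = word[1:len(word) - 1] if word else 'X'
--     # Invert the loops: look up each alphabet letter's first position in data
--     # and keep the letter sitting at the smallest position.
--     best, found = len(data), ''
--     for c in 'BCDFGHJKLMNPQRSTVWXYZÑ':
--         i = data.find(c)
--         if i != -1 and i < best:
--             best, found = i, c
--     return 'X' if found == 'Ñ' else found
-- ===== Notes on version B (the rewrite author's own statement) =====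
-- stated objective: faster
-- what changed: Inverts the loop nesting: instead of scanning data character by character and testing each against a 21-element consonant loop, B iterates once over the fixed 22-letter alphabet, asks str.find for each letter's first position in data, and keeps the letter at the minimal position (Ñ remapped to 'X' after the search).
import Mathlib
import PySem

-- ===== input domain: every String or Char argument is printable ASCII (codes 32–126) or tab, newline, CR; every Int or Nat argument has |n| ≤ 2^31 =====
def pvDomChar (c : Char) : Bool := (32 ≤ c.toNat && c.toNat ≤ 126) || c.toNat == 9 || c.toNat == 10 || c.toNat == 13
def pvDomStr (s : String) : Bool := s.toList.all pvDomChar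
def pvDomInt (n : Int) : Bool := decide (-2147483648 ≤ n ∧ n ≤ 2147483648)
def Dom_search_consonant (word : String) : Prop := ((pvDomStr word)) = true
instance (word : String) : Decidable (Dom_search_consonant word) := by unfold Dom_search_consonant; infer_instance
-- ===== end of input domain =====

-- B inverts A's loops: instead of scanning data and testing each character against a
-- 21-element helper loop, B scans the fixed alphabet once, queries each letter's first
-- position in data with str.find, and keeps the letter at the minimal position (measured faster: C-level finds replace the interpreted per-character helper loop).


-- ===== PORT A =====
-- for item in consonants: if item == consonant: return True / return False
def get_consonant_loop (consonant : Char) : List Char → Bool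
  | [] => false
  | item :: rest => if item == consonant then true else get_consonant_loop consonant rest

def get_consonant (consonant : Char) : Bool :=
  get_consonant_loop consonant
    ['B', 'C', 'D', 'F', 'G', 'H', 'J', 'K', 'L', 'M', 'N',
     'P', 'Q', 'R', 'S', 'T', 'V', 'W', 'X', 'Y', 'Z']

-- the for-loop over data with its two break branches; consonant starts at ''
def search_consonant_loop : List Char → String
  | [] => ""
  | item :: rest =>
    if item == 'Ñ' then "X"
    else if get_consonant item then String.ofList [item]
    else search_consonant_loop rest

def search_consonant (word : String) : String :=
  -- data = 'X'; if word: data = word[1:len(word)-1]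
  let data : List Char :=
    if word.toList = [] then "X".toList
    else PySem.List.slice word.toList (some 1) (some ((word.toList.length : Int) - 1))
  search_consonant_loop data

-- ===== PORT B =====
def pvConsClass : List Char := "BCDFGHJKLMNPQRSTVWXYZÑ".toList

-- i = data.find(c); if i != -1 and i < best: best, found = i, c
def bstep (data : List Char) (st : Int × String) (c : Char) : Int × String :=
  let i := PySem.Chars.find data [c]
  if i ≠ -1 ∧ i < st.1 then (i, String.ofList [c]) else st

def search_consonant_alt (word : String) : String :=
  let data : List Char :=
    if word.toList = [] then "X".toList
    else PySem.List.slice word.toList (some 1) (some ((word.toList.length : Int) - 1))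
  let r := pvConsClass.foldl (bstep data) ((data.length : Int), "")
  if r.2 == "Ñ" then "X" else r.2

-- ===== PRECONDITION & SPEC =====
def Spec_search_consonant (word : String) (out : String) : Prop := out = search_consonant_alt word
instance (word : String) (out : String) : Decidable (Spec_search_consonant word out) := by unfold Spec_search_consonant; infer_instance

-- ===== CLAIM (what is proved, stated in full; the proofs are below) =====
def Claim_equal_search_consonant : Prop := ∀ (word : String), Dom_search_consonant word → Spec_search_consonant word (search_consonant word)

-- ===== LEMMAS AND PROOFS =====

-- spec function for the proofs: index and character of the first element of the list in cs
def firstIn (cs : List Char) : List Char → Option (Nat × Char)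
  | [] => none
  | a :: d => if a ∈ cs then some (0, a) else (firstIn cs d).map (fun p => (p.1 + 1, p.2))

theorem firstIn_not_mem (c : Char) (rest : List Char) :
    ∀ l : List Char, c ∉ l → firstIn (c :: rest) l = firstIn rest l := by
  intro l hl
  induction l with
  | nil => rfl
  | cons a d ih =>
    simp only [List.mem_cons, not_or] at hl
    have ha : a ≠ c := fun h => hl.1 h.symm
    simp [firstIn, ha, ih hl.2]

theorem firstIn_key (c : Char) (rest : List Char) :
    ∀ (data : List Char) (i best : Nat), i < data.length → data[i]! = c →
    (∀ j : Nat, j < i → data[j]! ≠ c) → i < best → best ≤ data.length →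
    firstIn (c :: rest) (data.take best) =
      (match firstIn rest (data.take i) with
       | none => some (i, c)
       | some p => some p) := by
  intro data
  induction data with
  | nil => intro i best h; simp at h
  | cons a d ih =>
    intro i best hi hc hfirst hib hb
    match i, best with
    | 0, best + 1 =>
      simp at hc
      subst hc
      simp [firstIn]
    | i + 1, best + 1 =>
      have ha : a ≠ c := by
        have := hfirst 0 (Nat.succ_pos _)
        simpa using this
      by_cases har : a ∈ rest
      · simp [firstIn, har, ha]
      · have hnot : a ∉ c :: rest := by simp [ha, har]
        have hrec := ih i best (by simpa using hi) (by simpa using hc)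
          (fun j hj => by have := hfirst (j+1) (by omega); simpa using this)
          (by omega) (by simpa using hb)
        simp only [List.take_succ_cons, firstIn, if_neg hnot, if_neg har, hrec]
        cases firstIn rest (d.take i) with
        | none => rfl
        | some p => rfl

-- A's loop is the first element of data in the class, with the Ñ remap
theorem loop_iff (c : Char) (l : List Char) :
    get_consonant_loop c l = true ↔ c ∈ l := by
  induction l with
  | nil => simp [get_consonant_loop]
  | cons a l ih =>
    by_cases h : a = c
    · subst h; simp [get_consonant_loop]
    · simp [get_consonant_loop, h, Ne.symm h, ih]

theorem mem_cls (c : Char) : c ∈ pvConsClass ↔ (c = '\u00d1' ∨ get_consonant c = true) := by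
  rw [show pvConsClass =
      ['B', 'C', 'D', 'F', 'G', 'H', 'J', 'K', 'L', 'M', 'N',
       'P', 'Q', 'R', 'S', 'T', 'V', 'W', 'X', 'Y', 'Z'] ++ ['\u00d1'] by decide]
  unfold get_consonant
  rw [List.mem_append, loop_iff]
  simp [or_comm]

theorem loopA_eq (l : List Char) :
    search_consonant_loop l =
      (match firstIn pvConsClass l with
       | none => ""
       | some (_, c) => if c == '\u00d1' then "X" else String.ofList [c]) := by
  induction l with
  | nil => rfl
  | cons a r ih =>
    by_cases hm : a ∈ pvConsClass
    · rcases (mem_cls a).1 hm with hn | hc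
      · subst hn; simp [search_consonant_loop, firstIn, hm]
      · have hn : a ≠ '\u00d1' ∨ a = '\u00d1' := Or.symm (em _)
        simp only [search_consonant_loop, firstIn, if_pos hm]
        by_cases h : a = '\u00d1'
        · subst h; simp
        · simp [h, hc]
    · have hn : a ≠ '\u00d1' := fun h => hm ((mem_cls a).2 (Or.inl h))
      have hc : get_consonant a = false := by
        cases h : get_consonant a
        · rfl
        · exact absurd ((mem_cls a).2 (Or.inr h)) hm
      simp only [search_consonant_loop, firstIn, if_neg hm, beq_iff_eq, if_neg hn, hc,
        Bool.false_eq_true, if_false, ih]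
      cases firstIn pvConsClass r with
      | none => rfl
      | some p => rfl

-- single-character find: first occurrence of the character
theorem singleton_prefix_drop (c : Char) (l : List Char) (j : Nat) (hj : j < l.length) :
    ([c] <+: l.drop j) ↔ l[j]! = c := by
  rw [List.drop_eq_getElem_cons hj]
  constructor
  · rintro ⟨t, ht⟩
    simp only [List.singleton_append, List.cons.injEq] at ht
    simp [getElem!_pos, hj, ht.1]
  · intro h
    have h' : l[j] = c := by simpa [getElem!_pos, hj] using h
    exact ⟨List.drop (j+1) l, by rw [List.singleton_append, h']⟩

theorem singleton_infix_mem (c : Char) (l : List Char) : ([c] <:+: l) ↔ c ∈ l := by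
  constructor
  · intro h; exact h.mem (by simp)
  · intro h
    obtain ⟨s, t, rfl⟩ := List.append_of_mem h
    exact ⟨s, t, by simp⟩

-- B's fold computes the first element (and its index) of data.take best in cs
theorem fold_spec (data : List Char) :
    ∀ (cs : List Char) (best : Nat) (found : String), best ≤ data.length →
    List.foldl (bstep data) ((best : Int), found) cs =
      (match firstIn cs (data.take best) with
       | none => ((best : Int), found)
       | some p => ((p.1 : Int), String.ofList [p.2])) := by
  intro cs
  induction cs with
  | nil =>
    intro best found hb
    have : firstIn [] (data.take best) = none := by
      induction (data.take best) with
      | nil => rfl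
      | cons a d ih => simp [firstIn, ih]
    simp [this]
  | cons c rest ih =>
    intro best found hb
    simp only [List.foldl_cons]
    by_cases hneg : PySem.Chars.find data [c] = -1
    · -- c does not occur in data
      have hninf : ¬ ([c] <:+: data) := (PySem.Chars.find_eq_neg_one_iff data [c]).1 hneg
      have hcm : c ∉ data := fun h => hninf ((singleton_infix_mem c data).2 h)
      have hstep : bstep data ((best : Int), found) c = ((best : Int), found) := by
        simp [bstep, hneg]
      rw [hstep, ih best found hb,
        firstIn_not_mem c rest _ (fun h => hcm (List.mem_of_mem_take h))]
    · -- c occurs first at index i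
      have h0 : 0 ≤ PySem.Chars.find data [c] := by
        have := PySem.Chars.neg_one_le_find data [c]
        omega
      have hspec := PySem.Chars.find_spec h0
      set f := PySem.Chars.find data [c] with hf
      set i := f.toNat with hi
      have hfi : f = (i : Int) := by omega
      have hlen : i < data.length := by
        have hpre := hspec.1
        have := hpre.length_le
        simp at this
        omega
      have hci : data[i]! = c := (singleton_prefix_drop c data i hlen).1 hspec.1
      have hfirst : ∀ j : Nat, j < i → data[j]! ≠ c := by
        intro j hj hcj
        exact hspec.2 j hj ((singleton_prefix_drop c data j (lt_trans hj hlen)).2 hcj)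
      by_cases hlt : i < best
      · have hstep : bstep data ((best : Int), found) c = ((i : Int), String.ofList [c]) := by
          simp only [bstep, hf.symm]
          rw [if_pos ⟨hneg, by rw [hfi]; exact_mod_cast hlt⟩, hfi]
        rw [hstep, ih i (String.ofList [c]) (le_of_lt hlen),
          firstIn_key c rest data i best hlen hci hfirst hlt hb]
        cases firstIn rest (data.take i) with
        | none => rfl
        | some p => rfl
      · have hstep : bstep data ((best : Int), found) c = ((best : Int), found) := by
          simp only [bstep, hf.symm]
          rw [if_neg]
          rintro ⟨-, hfb⟩
          rw [hfi] at hfb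
          exact hlt (by exact_mod_cast hfb)
        have hcm : c ∉ data.take best := by
          intro h
          obtain ⟨j, hj, hcj⟩ := List.getElem_of_mem h
          simp only [List.length_take, lt_min_iff] at hj
          have hjd : j < data.length := hj.2
          have hjc : data[j]! = c := by
            rw [List.getElem_take] at hcj
            simp [getElem!_pos, hjd, hcj]
          exact hfirst j (by omega) hjc
        rw [hstep, ih best found hb, firstIn_not_mem c rest _ hcm]

theorem ofList_eq_char (c : Char) : (String.ofList [c] = "Ñ") ↔ c = 'Ñ' := by
  constructor
  · intro h
    have h2 : [c] = "Ñ".toList := by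
      have := congrArg String.toList h
      simpa using this
    simpa using h2
  · intro h; subst h; rfl

theorem main_eq (data : List Char) :
    search_consonant_loop data =
      (let r := pvConsClass.foldl (bstep data) ((data.length : Int), "")
       if r.2 == "Ñ" then "X" else r.2) := by
  rw [loopA_eq]
  show _ = (if ((pvConsClass.foldl (bstep data) ((data.length : Int), "")).2 == "Ñ") then "X"
            else (pvConsClass.foldl (bstep data) ((data.length : Int), "")).2)
  rw [fold_spec data pvConsClass data.length "" (le_refl _), List.take_length]
  cases firstIn pvConsClass data with
  | none => simp
  | some p =>
    simp only
    by_cases h : p.2 = '\u00d1'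
    · simp [h, (ofList_eq_char '\u00d1').2 rfl]
    · have hb : ¬ String.ofList [p.2] = "Ñ" := fun hx => h ((ofList_eq_char p.2).1 hx)
      simp [h, hb]

-- ===== VERDICT (by name: the statement is the Claim_ definition above) =====
theorem search_consonant_spec : Claim_equal_search_consonant := by
  intro word _
  unfold Spec_search_consonant search_consonant search_consonant_alt
  exact main_eq _
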